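-- pv_equiv track=rewrite | github.com/Kudito98/Codesignal-tasks | intro/41-digitDegree/digitDegree.py | solution
-- ===== SOURCE A (Python) =====
-- def solution(n):
--     count = 0
--     while len(str(n)) != 1:
--         count += 1
--         sum_digit = 0
--         for digit in str(n):
--             sum_digit += int(digit)
--             n = sum_digit
--     return count
-- ===== SOURCE B (Python) =====
-- def solution(n):
--     if len(str(n)) == 1:
--         return 0
--     return 1 + solution(sum(int(d) for d in str(n)))
-- ===== Notes on version B (the rewrite author's own statement) =====
-- stated objective: simpler
-- what changed: Replaces the while-loop with an explicit step counter and an in-loop pair of mutating variables by a direct recursion that returns 1 + solution(digit_sum(n)), carrying the count in the return value instead of an accumulator.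
import Mathlib
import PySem

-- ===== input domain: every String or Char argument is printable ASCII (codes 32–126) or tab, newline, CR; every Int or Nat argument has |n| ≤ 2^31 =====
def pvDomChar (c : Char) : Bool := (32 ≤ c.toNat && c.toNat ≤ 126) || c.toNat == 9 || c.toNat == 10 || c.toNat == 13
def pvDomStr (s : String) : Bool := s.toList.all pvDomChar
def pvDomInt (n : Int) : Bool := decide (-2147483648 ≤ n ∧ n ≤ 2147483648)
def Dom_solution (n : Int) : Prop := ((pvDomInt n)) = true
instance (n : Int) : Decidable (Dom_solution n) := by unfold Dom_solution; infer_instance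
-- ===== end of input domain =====

-- B recurses instead of looping with a counter: same value, same cost; header objective: simpler.

-- int(digit) for a single character; Python raises ValueError on a non-digit character
-- (e.g. '-' of a negative n), which Pre_solution excludes, so the default 0 is never reached inside Pre_.
def pyIntChar (c : Char) : Int := (PySem.Int.ofChars? [c]).getD 0

-- ===== PORT A =====
-- A's while-loop: state (count, n); the body folds over str(n) keeping (sum_digit, n),
-- re-assigning n := sum_digit at each character, exactly as the Python does.
-- fuel is only a totality guard; n.natAbs + 1 always exceeds the number of iterations A performs.
def solutionLoop (fuel : Nat) (count : Int) (n : Int) : Int :=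
  match fuel with
  | 0 => count
  | Nat.succ fuel =>
    if (PySem.Int.toChars n).length ≠ 1 then
      let p := (PySem.Int.toChars n).foldl
        (fun (st : Int × Int) c => (st.1 + pyIntChar c, st.1 + pyIntChar c)) ((0 : Int), n)
      solutionLoop fuel (count + 1) p.2
    else count

def solution (n : Int) : Int := solutionLoop (n.natAbs + 1) 0 n

-- ===== PORT B =====
-- sum(int(d) for d in str(n))
def digitSumB (n : Int) : Int :=
  (PySem.Int.toChars n).foldl (fun s c => s + pyIntChar c) 0

-- fuel is only a totality guard, as in the port of A.
def solutionRec (fuel : Nat) (n : Int) : Int :=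
  match fuel with
  | 0 => 0
  | Nat.succ fuel =>
    if (PySem.Int.toChars n).length = 1 then 0
    else 1 + solutionRec fuel (digitSumB n)

def solution_alt (n : Int) : Int := solutionRec (n.natAbs + 1) n

-- ===== PRECONDITION & SPEC =====
-- Python A raises ValueError on every negative n (int('-')); Pre_ excludes exactly those.
def Pre_solution (n : Int) : Prop := 0 ≤ n
instance (n : Int) : Decidable (Pre_solution n) := by unfold Pre_solution; infer_instance
def pvWitness_solution : Int := (12345)

def Spec_solution (n : Int) (out : Int) : Prop := out = solution_alt n
instance (n : Int) (out : Int) : Decidable (Spec_solution n out) := by unfold Spec_solution; infer_instance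

-- ===== CLAIM (what is proved, stated in full; the proofs are below) =====
def Claim_equal_solution : Prop := ∀ (n : Int), Dom_solution n → Pre_solution n → Spec_solution n (solution n)

-- ===== LEMMAS AND PROOFS =====

lemma toDigitsCore_len_mono (f : Nat) :
    ∀ (n : Nat) (l : List Char), l.length ≤ (Nat.toDigitsCore 10 f n l).length := by
  induction f with
  | zero => intro n l; simp [Nat.toDigitsCore]
  | succ f ih =>
    intro n l
    rw [Nat.toDigitsCore]
    split
    · simp
    · calc l.length ≤ (Nat.digitChar (n % 10) :: l).length := by simp
        _ ≤ _ := ih _ _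

lemma toChars_ne_nil (n : Int) : PySem.Int.toChars n ≠ [] := by
  simp only [PySem.Int.toChars]
  split
  · simp
  · show Nat.toDigits 10 n.toNat ≠ []
    rw [Nat.toDigits, Nat.toDigitsCore]
    split
    · simp
    · intro h
      have := toDigitsCore_len_mono n.toNat (n.toNat / 10) [Nat.digitChar (n.toNat % 10)]
      rw [h] at this
      simp at this

lemma foldl_pair (l : List Char) :
    ∀ (s : Int),
      (l.foldl (fun (st : Int × Int) c => (st.1 + pyIntChar c, st.1 + pyIntChar c)) (s, s)).2
        = l.foldl (fun a c => a + pyIntChar c) s := by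
  induction l with
  | nil => intro s; rfl
  | cons c t ih =>
    intro s
    simp only [List.foldl_cons]
    exact ih (s + pyIntChar c)

lemma pair_snd_eq_digitSum (n : Int) :
    ((PySem.Int.toChars n).foldl
      (fun (st : Int × Int) c => (st.1 + pyIntChar c, st.1 + pyIntChar c)) ((0 : Int), n)).2
      = digitSumB n := by
  unfold digitSumB
  obtain ⟨c, t, h⟩ := List.exists_cons_of_ne_nil (toChars_ne_nil n)
  rw [h]
  simp only [List.foldl_cons]
  exact foldl_pair t (0 + pyIntChar c)

lemma loop_eq_rec (fuel : Nat) :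
    ∀ (count n : Int), solutionLoop fuel count n = count + solutionRec fuel n := by
  induction fuel with
  | zero => intro count n; simp [solutionLoop, solutionRec]
  | succ fuel ih =>
    intro count n
    rw [solutionLoop, solutionRec]
    by_cases h : (PySem.Int.toChars n).length = 1
    · simp [h]
    · simp only [h, ne_eq, not_false_eq_true, if_true, if_false]
      rw [pair_snd_eq_digitSum, ih]
      ring

-- ===== VERDICT (by name: the statement is the Claim_ definition above) =====
theorem solution_spec : Claim_equal_solution := by
  intro n _ _
  show solution n = solution_alt n
  unfold solution solution_alt
  rw [loop_eq_rec]
  ring
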